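-- pv_equiv track=rewrite | github.com/Kjdragan/universal_agent | tests/unit/test_effects_from_receipts.py | _effects_from_receipts
-- ===== SOURCE A (Python) =====
-- from typing import Any
--
-- def _effects_from_receipts(
--     receipt_items: list[dict[str, Any]],
--     effect_rules: list[tuple[str, str, str | None]],
-- ) -> set[str]:
--     """Standalone copy of the refactored logic for unit testing."""
--     effects: set[str] = set()
--     for receipt in receipt_items:
--         tool_name = str(receipt.get("tool_name", "") or "")
--         response_ref = str(receipt.get("response_ref", "") or "")
--         tool_name_upper = tool_name.upper()
--         haystack = f"{tool_name} {response_ref}".lower()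
--         for effect_label, tool_pat, hay_pat in effect_rules:
--             if effect_label in effects:
--                 continue
--             if tool_pat not in tool_name_upper:
--                 continue
--             if hay_pat is not None and not any(
--                 p in haystack for p in hay_pat.split("|")
--             ):
--                 continue
--             effects.add(effect_label)
--     return effects
-- ===== SOURCE B (Python) =====
-- def _effects_from_receipts(
--     receipt_items,
--     effect_rules,
-- ):
--     """Worklist version: a rule is dropped from the pending list once it fires."""
--     effects = set()
--     pending = list(effect_rules)
--     for receipt in receipt_items:
--         if not pending:
--             break
--         tool_name = str(receipt.get("tool_name", "") or "")
--         response_ref = str(receipt.get("response_ref", "") or "")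
--         tool_name_upper = tool_name.upper()
--         haystack = f"{tool_name} {response_ref}".lower()
--         still_pending = []
--         for rule in pending:
--             effect_label, tool_pat, hay_pat = rule
--             if tool_pat in tool_name_upper and (
--                 hay_pat is None or any(p in haystack for p in hay_pat.split("|"))
--             ):
--                 effects.add(effect_label)
--             else:
--                 still_pending.append(rule)
--         pending = still_pending
--     return effects
-- ===== Notes on version B (the rewrite author's own statement) =====
-- stated objective: alternative
-- what changed: Replaces A's full rescan of all rules per receipt with its label-membership continue guard by a shrinking worklist: each receipt partitions the pending rules, firing rules add their label and leave the worklist, and the loop stops early when no rules are pending.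
import Mathlib
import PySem

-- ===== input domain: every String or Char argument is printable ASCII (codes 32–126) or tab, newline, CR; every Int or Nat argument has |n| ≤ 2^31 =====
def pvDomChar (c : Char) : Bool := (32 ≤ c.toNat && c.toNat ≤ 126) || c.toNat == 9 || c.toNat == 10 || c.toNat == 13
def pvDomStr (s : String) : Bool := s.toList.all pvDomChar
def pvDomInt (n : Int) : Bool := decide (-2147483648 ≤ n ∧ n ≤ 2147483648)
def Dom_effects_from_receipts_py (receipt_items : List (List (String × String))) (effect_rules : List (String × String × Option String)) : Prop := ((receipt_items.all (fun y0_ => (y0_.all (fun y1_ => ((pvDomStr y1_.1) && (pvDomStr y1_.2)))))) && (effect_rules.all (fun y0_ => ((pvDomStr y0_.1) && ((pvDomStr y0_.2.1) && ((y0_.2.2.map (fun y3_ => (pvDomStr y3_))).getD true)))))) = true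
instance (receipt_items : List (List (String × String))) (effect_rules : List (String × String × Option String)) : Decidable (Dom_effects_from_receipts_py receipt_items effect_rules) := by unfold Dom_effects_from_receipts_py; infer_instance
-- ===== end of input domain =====

-- B replaces A's per-receipt rescan of ALL rules (guarded by label membership) with a shrinking
-- worklist of pending rules (objective: alternative decomposition); return values proved equal.

-- ===== PORT A =====
-- receipt.get(key, "") with Python's 'str(... or "")' coercion (identity on the str domain)
def pvGetField (receipt : List (String × String)) (k : String) : String :=
  (PySem.Dict.mk receipt).getD k ""

def effects_from_receipts_py (receipt_items : List (List (String × String))) (effect_rules : List (String × String × Option String)) : List String :=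
  receipt_items.foldl (fun effects receipt =>
    let tool_name := pvGetField receipt "tool_name"
    let response_ref := pvGetField receipt "response_ref"
    let tool_name_upper := PySem.Str.upper tool_name
    let haystack := PySem.Str.lower (PySem.Str.join " " [tool_name, response_ref])
    effect_rules.foldl (fun effects rule =>
      if PySem.Set.contains effects rule.1 then effects
      else if !(PySem.Str.isIn rule.2.1 tool_name_upper) then effects
      else if (match rule.2.2 with
               | none => false
               | some hp => !(((PySem.Str.split? hp "|").getD []).any (fun p => PySem.Str.isIn p haystack))) then effects
      else PySem.Set.add effects rule.1) effects) PySem.Set.empty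

-- ===== PORT B =====
-- Source B's match test for one rule against (TOOL_NAME_UPPER, haystack)
def pvMatches (rule : String × String × Option String) (upper hay : String) : Bool :=
  PySem.Str.isIn rule.2.1 upper &&
  (match rule.2.2 with
   | none => true
   | some hp => ((PySem.Str.split? hp "|").getD []).any (fun p => PySem.Str.isIn p hay))

def effects_from_receipts_py_alt (receipt_items : List (List (String × String))) (effect_rules : List (String × String × Option String)) : List String :=
  (receipt_items.foldl (fun (st : PySem.Set String × List (String × String × Option String)) receipt =>
    if st.2.isEmpty then st      -- 'if not pending: break'
    else
      let tool_name := pvGetField receipt "tool_name"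
      let response_ref := pvGetField receipt "response_ref"
      let tool_name_upper := PySem.Str.upper tool_name
      let haystack := PySem.Str.lower (PySem.Str.join " " [tool_name, response_ref])
      st.2.foldl (fun (st2 : PySem.Set String × List (String × String × Option String)) rule =>
        if pvMatches rule tool_name_upper haystack then (PySem.Set.add st2.1 rule.1, st2.2)
        else (st2.1, st2.2 ++ [rule])) (st.1, [])) (PySem.Set.empty, effect_rules)).1

-- ===== PRECONDITION & SPEC =====
def Spec_effects_from_receipts_py (receipt_items : List (List (String × String))) (effect_rules : List (String × String × Option String)) (out : List String) : Prop := out = effects_from_receipts_py_alt receipt_items effect_rules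
instance (receipt_items : List (List (String × String))) (effect_rules : List (String × String × Option String)) (out : List String) : Decidable (Spec_effects_from_receipts_py receipt_items effect_rules out) := by unfold Spec_effects_from_receipts_py; infer_instance

-- ===== CLAIM (what is proved, stated in full; the proofs are below) =====
def Claim_equal_effects_from_receipts_py : Prop := ∀ (receipt_items : List (List (String × String))) (effect_rules : List (String × String × Option String)), Dom_effects_from_receipts_py receipt_items effect_rules → Spec_effects_from_receipts_py receipt_items effect_rules (effects_from_receipts_py receipt_items effect_rules)

-- ===== LEMMAS AND PROOFS =====

-- A's inner fold (the guarded continue chain) as a named helper for the proofs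
def effect_rules_foldA (rules : List (String × String × Option String)) (u hay : String) (effects : PySem.Set String) : PySem.Set String :=
  rules.foldl (fun effects rule =>
    if PySem.Set.contains effects rule.1 then effects
    else if !(PySem.Str.isIn rule.2.1 u) then effects
    else if (match rule.2.2 with
             | none => false
             | some hp => !(((PySem.Str.split? hp "|").getD []).any (fun p => PySem.Str.isIn p hay))) then effects
    else PySem.Set.add effects rule.1) effects

-- the unguarded conditional-add fold over a rule list, for one receipt's (upper, hay)
def pvFoldG (u h : String) (rules : List (String × String × Option String)) (s : PySem.Set String) : PySem.Set String :=
  rules.foldl (fun s r => if pvMatches r u h then PySem.Set.add s r.1 else s) s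

-- rem is a sublist of rules whose skipped occurrences all have their label already in s
def pvKeep (rules rem : List (String × String × Option String)) (s : PySem.Set String) : Prop :=
  match rules with
  | [] => rem = []
  | r :: rs => (∃ rem', rem = r :: rem' ∧ pvKeep rs rem' s) ∨ (r.1 ∈ s ∧ pvKeep rs rem s)

theorem pv_mem_add (s : PySem.Set String) (x y : String) (h : y ∈ s) : y ∈ PySem.Set.add s x :=
  (PySem.Set.mem_add s x y).mpr (Or.inl h)

theorem pv_add_of_mem (s : PySem.Set String) (x : String) (h : x ∈ s) :
    PySem.Set.add s x = s := by
  simp [PySem.Set.add, PySem.Set.contains, h]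

theorem pv_mem_foldG (u h : String) (rules : List (String × String × Option String))
    (s : PySem.Set String) (y : String) (hy : y ∈ s) : y ∈ pvFoldG u h rules s := by
  induction rules generalizing s with
  | nil => exact hy
  | cons r rs ih =>
    simp only [pvFoldG, List.foldl_cons]
    split
    · exact ih _ (pv_mem_add _ _ _ hy)
    · exact ih _ hy

-- A's inner-loop body (membership-guarded continue chain) = the unguarded conditional add
theorem pv_bodyA_eq (u hay : String) (s : PySem.Set String)
    (r : String × String × Option String) :
    (if PySem.Set.contains s r.1 then s
     else if !(PySem.Str.isIn r.2.1 u) then s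
     else if (match r.2.2 with
              | none => false
              | some hp => !(((PySem.Str.split? hp "|").getD []).any (fun q => PySem.Str.isIn q hay))) then s
     else PySem.Set.add s r.1)
    = (if pvMatches r u hay then PySem.Set.add s r.1 else s) := by
  by_cases hc : PySem.Set.contains s r.1 = true
  · have hmem : r.1 ∈ s := by simpa [PySem.Set.contains] using hc
    rw [if_pos hc]
    split
    · rw [pv_add_of_mem s r.1 hmem]
    · rfl
  · rw [if_neg hc]
    unfold pvMatches
    cases hin : PySem.Str.isIn r.2.1 u with
    | false => simp
    | true =>
      cases h2 : r.2.2 with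
      | none => simp
      | some hp =>
        cases hany : ((PySem.Str.split? hp "|").getD []).any (fun q => PySem.Str.isIn q hay) <;>
          simp only [hany, Bool.not_true, Bool.not_false] <;> simp

-- pvKeep is monotone in the set
theorem pv_keep_mono (rules rem : List (String × String × Option String))
    (s t : PySem.Set String) (hst : ∀ y, y ∈ s → y ∈ t)
    (hk : pvKeep rules rem s) : pvKeep rules rem t := by
  induction rules generalizing rem with
  | nil => exact hk
  | cons r rs ih =>
    rcases hk with ⟨rem', hrm, hk'⟩ | ⟨hmem, hk'⟩
    · exact Or.inl ⟨rem', hrm, ih rem' hk'⟩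
    · exact Or.inr ⟨hst _ hmem, ih rem hk'⟩

-- folding the full rule list equals folding only the kept sublist
theorem pv_foldG_keep (u h : String) (rules rem : List (String × String × Option String))
    (s : PySem.Set String) (hk : pvKeep rules rem s) :
    pvFoldG u h rules s = pvFoldG u h rem s := by
  induction rules generalizing rem s with
  | nil => rw [hk]
  | cons r rs ih =>
    rcases hk with ⟨rem', hrm, hk'⟩ | ⟨hmem, hk'⟩
    · subst hrm
      simp only [pvFoldG, List.foldl_cons]
      by_cases hm : pvMatches r u h = true
      · rw [hm]; simp only [if_true]
        exact ih rem' _ (pv_keep_mono rs rem' s _ (fun y hy => pv_mem_add _ _ _ hy) hk')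
      · rw [Bool.not_eq_true] at hm
        simp only [hm, Bool.false_eq_true, if_false]
        exact ih rem' _ hk'
    · simp only [pvFoldG, List.foldl_cons]
      have : (if pvMatches r u h then PySem.Set.add s r.1 else s) = s := by
        split
        · exact pv_add_of_mem s r.1 hmem
        · rfl
      rw [this]
      exact ih rem _ hk'

-- B's pair-state inner fold computed componentwise
theorem pv_inner_pair (u h : String) (rem : List (String × String × Option String))
    (s : PySem.Set String) (acc : List (String × String × Option String)) :
    rem.foldl (fun (st2 : PySem.Set String × List (String × String × Option String)) rule =>
        if pvMatches rule u h then (PySem.Set.add st2.1 rule.1, st2.2)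
        else (st2.1, st2.2 ++ [rule])) (s, acc)
    = (pvFoldG u h rem s, acc ++ rem.filter (fun r => !pvMatches r u h)) := by
  induction rem generalizing s acc with
  | nil => simp [pvFoldG]
  | cons r rs ih =>
    simp only [List.foldl_cons, pvFoldG, List.filter_cons]
    by_cases hm : pvMatches r u h = true
    · simp only [hm, if_true, Bool.not_true, ih]
      rfl
    · rw [Bool.not_eq_true] at hm
      simp [hm, ih, pvFoldG]

-- the updated worklist is still a kept sublist w.r.t. the grown set
theorem pv_keep_step (u h : String) (rules rem : List (String × String × Option String))
    (s : PySem.Set String) (hk : pvKeep rules rem s) :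
    pvKeep rules (rem.filter (fun r => !pvMatches r u h)) (pvFoldG u h rem s) := by
  induction rules generalizing rem s with
  | nil => rw [hk]; rfl
  | cons r rs ih =>
    rcases hk with ⟨rem', hrm, hk'⟩ | ⟨hmem, hk'⟩
    · subst hrm
      simp only [List.filter_cons, pvFoldG, List.foldl_cons]
      by_cases hm : pvMatches r u h = true
      · rw [hm]
        simp only [Bool.not_true, Bool.false_eq_true, if_false, if_true]
        refine Or.inr ⟨?_, ?_⟩
        · exact pv_mem_foldG u h rem' _ _ ((PySem.Set.mem_add s r.1 r.1).mpr (Or.inr rfl))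
        · exact ih rem' _ (pv_keep_mono rs rem' s _ (fun y hy => pv_mem_add _ _ _ hy) hk')
      · rw [Bool.not_eq_true] at hm
        rw [hm]
        simp only [Bool.not_false, Bool.false_eq_true, if_false, if_true]
        exact Or.inl ⟨_, rfl, ih rem' _ hk'⟩
    · refine Or.inr ⟨pv_mem_foldG u h rem _ _ hmem, ih rem _ hk'⟩

theorem pv_keep_refl (rules : List (String × String × Option String)) (s : PySem.Set String) :
    pvKeep rules rules s := by
  induction rules with
  | nil => rfl
  | cons r rs ih => exact Or.inl ⟨rs, rfl, ih⟩

-- main induction over receipts: A's set state = B's set component, under pvKeep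
theorem pv_main (receipts : List (List (String × String)))
    (rules rem : List (String × String × Option String))
    (s : PySem.Set String) (hk : pvKeep rules rem s) :
    receipts.foldl (fun effects receipt =>
      let tool_name := pvGetField receipt "tool_name"
      let response_ref := pvGetField receipt "response_ref"
      let tool_name_upper := PySem.Str.upper tool_name
      let haystack := PySem.Str.lower (PySem.Str.join " " [tool_name, response_ref])
      effect_rules_foldA rules tool_name_upper haystack effects) s
    = (receipts.foldl (fun (st : PySem.Set String × List (String × String × Option String)) receipt =>
        if st.2.isEmpty then st
        else
          let tool_name := pvGetField receipt "tool_name"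
          let response_ref := pvGetField receipt "response_ref"
          let tool_name_upper := PySem.Str.upper tool_name
          let haystack := PySem.Str.lower (PySem.Str.join " " [tool_name, response_ref])
          st.2.foldl (fun (st2 : PySem.Set String × List (String × String × Option String)) rule =>
            if pvMatches rule tool_name_upper haystack then (PySem.Set.add st2.1 rule.1, st2.2)
            else (st2.1, st2.2 ++ [rule])) (st.1, [])) (s, rem)).1 := by
  induction receipts generalizing s rem with
  | nil => rfl
  | cons receipt rs ih =>
    simp only [List.foldl_cons]
    set u := PySem.Str.upper (pvGetField receipt "tool_name") with hu
    set hay := PySem.Str.lower (PySem.Str.join " " [pvGetField receipt "tool_name", pvGetField receipt "response_ref"]) with hh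
    have hA : effect_rules_foldA rules u hay s = pvFoldG u hay rules s := by
      unfold effect_rules_foldA pvFoldG
      apply PySem.List.foldl_congr_mem
      intro a r _
      exact pv_bodyA_eq u hay a r
    by_cases he : rem = []
    · subst he
      simp only [List.isEmpty_nil, if_true]
      rw [hA, pv_foldG_keep u hay rules [] s hk]
      exact ih [] (pvFoldG u hay [] s) hk
    · rw [if_neg (by simp [he])]
      simp only [pv_inner_pair u hay rem s []]
      rw [hA, pv_foldG_keep u hay rules rem s hk, List.nil_append]
      exact ih _ _ (pv_keep_step u hay rules rem s hk)

-- ===== VERDICT (by name: the statement is the Claim_ definition above) =====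
theorem effects_from_receipts_py_spec : Claim_equal_effects_from_receipts_py := by
  intro receipt_items effect_rules _
  unfold Spec_effects_from_receipts_py effects_from_receipts_py effects_from_receipts_py_alt
  exact pv_main receipt_items effect_rules effect_rules PySem.Set.empty
    (pv_keep_refl effect_rules PySem.Set.empty)
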